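-- pv_equiv track=rewrite | github.com/VladVons/py-vRelaySrv | src/App/Scraper/Scheme.py | DigSplit
-- ===== SOURCE A (Python) =====
-- _Invisible = [' ', '\t', '\n', '\r', '\xA0']
--
-- _Digits = '0123456789.'
--
-- def DigSplit(aValue: str) -> tuple:
--     Digit = ''
--     Before = ''
--     After = ''
--     for x in aValue:
--         if (x in _Invisible):
--             continue
--         elif (x in _Digits):
--             Digit += x
--         else:
--             if (Digit):
--                 After += x
--             else:
--                 Before += x
--     Res = (Before, Digit, After)
--     return Res
-- ===== SOURCE B (Python) =====
-- _Invisible = [' ', '\t', '\n', '\r', '\xA0']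
--
-- _Digits = '0123456789.'
--
-- def DigSplit(aValue: str) -> tuple:
--     cleaned = [c for c in aValue if c not in _Invisible]
--     idx = next((i for i, c in enumerate(cleaned) if c in _Digits), None)
--     if idx is None:
--         return (''.join(cleaned), '', '')
--     tail = cleaned[idx:]
--     return (''.join(cleaned[:idx]),
--             ''.join(c for c in tail if c in _Digits),
--             ''.join(c for c in tail if c not in _Digits))
-- ===== Notes on version B (the rewrite author's own statement) =====
-- stated objective: alternative
-- what changed: Replaces the single branching state-machine pass (three accumulators with a 'digit seen yet' mode switch) by a first-digit-index lookup on the invisible-stripped character list followed by slice/partition passes.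
import Mathlib
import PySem

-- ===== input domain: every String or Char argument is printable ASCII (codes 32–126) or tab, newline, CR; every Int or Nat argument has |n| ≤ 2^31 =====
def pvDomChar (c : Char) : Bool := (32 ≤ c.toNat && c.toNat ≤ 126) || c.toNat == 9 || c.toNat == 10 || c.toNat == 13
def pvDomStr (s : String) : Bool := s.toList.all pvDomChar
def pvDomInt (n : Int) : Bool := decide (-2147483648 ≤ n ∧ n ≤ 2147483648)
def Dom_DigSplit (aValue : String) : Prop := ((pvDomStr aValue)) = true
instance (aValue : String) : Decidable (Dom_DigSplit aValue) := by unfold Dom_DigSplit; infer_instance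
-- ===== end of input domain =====

-- B replaces A's one-pass mode-switching state machine by first-digit-index lookup plus partitions (alternative decomposition, same cost).

-- shared constants of the module: _Invisible and _Digits membership tests
def pvInv (c : Char) : Bool := [' ', '\t', '\n', '\r', '\xA0'].contains c
def pvDig (c : Char) : Bool := "0123456789.".toList.contains c

-- ===== PORT A =====
-- loop body of A: skip invisibles, append digit chars to Digit, others to After if Digit non-empty else Before
def pvStepA (st : List Char × List Char × List Char) (x : Char) : List Char × List Char × List Char :=
  if pvInv x then st
  else if pvDig x then (st.1, st.2.1 ++ [x], st.2.2)
  else if st.2.1.isEmpty then (st.1 ++ [x], st.2.1, st.2.2)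
  else (st.1, st.2.1, st.2.2 ++ [x])

def DigSplit (aValue : String) : String × String × String :=
  let st := aValue.toList.foldl pvStepA ([], [], [])
  (String.ofList st.1, String.ofList st.2.1, String.ofList st.2.2)

-- ===== PORT B =====
def DigSplit_alt (aValue : String) : String × String × String :=
  let cleaned := aValue.toList.filter (fun c => !pvInv c)
  match cleaned.findIdx? pvDig with
  | none => (String.ofList cleaned, "", "")
  | some i =>
      let tail := cleaned.drop i
      (String.ofList (cleaned.take i), String.ofList (tail.filter pvDig),
       String.ofList (tail.filter (fun c => !pvDig c)))

-- ===== PRECONDITION & SPEC =====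
def Spec_DigSplit (aValue : String) (out : String × String × String) : Prop := out = DigSplit_alt aValue
instance (aValue : String) (out : String × String × String) : Decidable (Spec_DigSplit aValue out) := by unfold Spec_DigSplit; infer_instance

-- ===== CLAIM (what is proved, stated in full; the proofs are below) =====
def Claim_equal_DigSplit : Prop := ∀ (aValue : String), Dom_DigSplit aValue → Spec_DigSplit aValue (DigSplit aValue)

-- ===== LEMMAS AND PROOFS =====

-- invisible characters are skipped: folding over l equals folding over its invisible-stripped filter
theorem foldl_stepA_filter (l : List Char) (s : List Char × List Char × List Char) :
    l.foldl pvStepA s = (l.filter (fun c => !pvInv c)).foldl pvStepA s := by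
  induction l generalizing s with
  | nil => rfl
  | cons x xs ih =>
    by_cases h : pvInv x = true
    · simp [h, pvStepA, ih]
    · simp only [Bool.not_eq_true] at h
      simp [h, ih]

-- digit regime: once Digit is non-empty, digits go to Digit and the rest to After
theorem foldl_stepA_dig (m : List Char) (B D A : List Char)
    (hD : D.isEmpty = false) (hm : ∀ c ∈ m, pvInv c = false) :
    m.foldl pvStepA (B, D, A)
      = (B, D ++ m.filter pvDig, A ++ m.filter (fun c => !pvDig c)) := by
  induction m generalizing D A with
  | nil => simp
  | cons x xs ih =>
    have hx : pvInv x = false := hm x (List.mem_cons_self ..)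
    have hxs : ∀ c ∈ xs, pvInv c = false := fun c hc => hm c (List.mem_cons_of_mem _ hc)
    by_cases hd : pvDig x = true
    · have : xs.foldl pvStepA (B, D ++ [x], A) = _ :=
        ih (D ++ [x]) A (by simp) hxs
      simp [List.foldl_cons, pvStepA, hx, hd, this]
    · simp only [Bool.not_eq_true] at hd
      have : xs.foldl pvStepA (B, D, A ++ [x]) = _ := ih D (A ++ [x]) hD hxs
      simp [List.foldl_cons, pvStepA, hx, hd, hD, this]

-- search regime: with Digit empty, A scans for the first digit, matching findIdx?
theorem foldl_stepA_search (m : List Char) (B : List Char)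
    (hm : ∀ c ∈ m, pvInv c = false) :
    m.foldl pvStepA (B, [], [])
      = match m.findIdx? pvDig with
        | none => (B ++ m, [], [])
        | some i => (B ++ m.take i, (m.drop i).filter pvDig,
                     (m.drop i).filter (fun c => !pvDig c)) := by
  induction m generalizing B with
  | nil => simp
  | cons x xs ih =>
    have hx : pvInv x = false := hm x (List.mem_cons_self ..)
    have hxs : ∀ c ∈ xs, pvInv c = false := fun c hc => hm c (List.mem_cons_of_mem _ hc)
    by_cases hd : pvDig x = true
    · have hfold := foldl_stepA_dig xs B [x] [] (by simp) hxs
      simp [List.foldl_cons, pvStepA, hx, hd, hfold, List.findIdx?_cons]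
    · simp only [Bool.not_eq_true] at hd
      have := ih (B ++ [x]) hxs
      simp only [List.foldl_cons, pvStepA, hx, hd, Bool.false_eq_true, if_false,
        List.isEmpty_nil, if_true, this, List.findIdx?_cons]
      cases h : xs.findIdx? pvDig with
      | none => simp
      | some i => simp

-- ===== VERDICT (by name: the statement is the Claim_ definition above) =====
theorem DigSplit_spec : Claim_equal_DigSplit := by
  intro aValue _
  unfold Spec_DigSplit DigSplit DigSplit_alt
  rw [foldl_stepA_filter]
  rw [foldl_stepA_search _ [] (by intro c hc; simpa using (List.mem_filter.mp hc).2)]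
  cases h : (aValue.toList.filter (fun c => !pvInv c)).findIdx? pvDig with
  | none => simp [h]
  | some i => simp [h]
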